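-- pv_equiv track=rewrite | github.com/MaiPriyanshuHoooon/triageX | core/parsers.py | parse_powershell_formatlist_table
-- ===== SOURCE A (Python) =====
-- def escape_html(text):
--     """Escape special HTML characters"""
--     if not text:
--         return ""
--     return (str(text)
--             .replace("&", "&amp;")
--             .replace("<", "&lt;")
--             .replace(">", "&gt;")
--             .replace('"', "&quot;")
--             .replace("'", "&#x27;"))
--
-- def parse_powershell_formatlist_table(lines):
--     """Parse PowerShell Format-List output into table"""
--     html = '<table class="data-table">\n'
--     html += '  <thead>\n    <tr><th>Property</th><th>Value</th></tr>\n  </thead>\n'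
--     html += '  <tbody>\n'
--
--     for line in lines:
--         line = line.strip()
--         if ':' in line and not line.startswith('==='):
--             # Split on first colon
--             parts = line.split(':', 1)
--             if len(parts) == 2:
--                 key = parts[0].strip()
--                 value = parts[1].strip()
--                 if key:  # Allow empty values
--                     html += f'    <tr><td>{escape_html(key)}</td><td>{escape_html(value) if value else "&nbsp;"}</td></tr>\n'
--         elif line and not line.startswith('==='):
--             # If it's a header line (no colon), show as section header
--             if not line.startswith(' '):
--                 html += f'    <tr class="section-header"><td colspan="2"><strong>{escape_html(line)}</strong></td></tr>\n'
--
--     html += '  </tbody>\n</table>'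
--     return html
-- ===== SOURCE B (Python) =====
-- def parse_powershell_formatlist_table(lines):
--     """Parse PowerShell Format-List output into table (classify-then-render)."""
--     # Pass 1: classify each line into a record: (key, value) for a property row,
--     # (text, None) for a section header; everything else is dropped.
--     records = []
--     for raw in lines:
--         line = raw.strip()
--         if line.startswith('==='):
--             continue
--         parts = line.split(':', 1)
--         if len(parts) == 2:
--             key = parts[0].strip()
--             if key:
--                 records.append((key, parts[1].strip()))
--         elif line:
--             records.append((line, None))
--
--     # Pass 2: render the records.
--     def esc(text):
--         for old, new in (("&", "&amp;"), ("<", "&lt;"), (">", "&gt;"),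
--                          ('"', "&quot;"), ("'", "&#x27;")):
--             text = text.replace(old, new)
--         return text
--
--     def render(rec):
--         key, value = rec
--         if value is None:
--             return f'    <tr class="section-header"><td colspan="2"><strong>{esc(key)}</strong></td></tr>\n'
--         return f'    <tr><td>{esc(key)}</td><td>{esc(value) if value else "&nbsp;"}</td></tr>\n'
--
--     return ('<table class="data-table">\n'
--             '  <thead>\n    <tr><th>Property</th><th>Value</th></tr>\n  </thead>\n'
--             '  <tbody>\n'
--             + ''.join(map(render, records))
--             + '  </tbody>\n</table>')
-- ===== Notes on version B (the rewrite author's own statement) =====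
-- stated objective: alternative
-- what changed: Split the single accumulate-HTML-while-scanning loop into two passes: a classification pass that turns lines into (key, value)/(header, None) records driven by the length of split(':', 1) (no 'in' test, no redundant length/leading-space re-checks), and a separate rendering pass that joins the mapped records between fixed prefix/suffix.
import Mathlib
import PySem

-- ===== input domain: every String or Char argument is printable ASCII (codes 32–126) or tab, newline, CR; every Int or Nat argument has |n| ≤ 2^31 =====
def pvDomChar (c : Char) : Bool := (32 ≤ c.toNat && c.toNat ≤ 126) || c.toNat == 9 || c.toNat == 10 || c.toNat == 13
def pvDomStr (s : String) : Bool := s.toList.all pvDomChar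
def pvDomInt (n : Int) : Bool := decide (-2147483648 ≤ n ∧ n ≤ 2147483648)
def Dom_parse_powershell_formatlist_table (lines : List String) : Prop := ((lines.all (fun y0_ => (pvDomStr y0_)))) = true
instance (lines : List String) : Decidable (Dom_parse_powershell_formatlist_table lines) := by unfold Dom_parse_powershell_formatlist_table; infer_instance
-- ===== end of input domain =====

-- B re-decomposes A's single accumulate-HTML loop into a classification pass (records) plus a
-- separate rendering pass; classification is driven by the length of split(':', 1) instead of an
-- 'in' test. Same cost, alternative structure; equivalence of the return value is proved below.

-- ===== PORT A =====
def pvEscapeHtml (text : String) : String :=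
  if text = "" then ""          -- `if not text: return ""`
  else
    PySem.Str.replace
      (PySem.Str.replace
        (PySem.Str.replace
          (PySem.Str.replace
            (PySem.Str.replace text "&" "&amp;") "<" "&lt;") ">" "&gt;") "\"" "&quot;") "'" "&#x27;"

-- the body of A's `for line in lines:` loop: the HTML chunk appended for one line
def pvLineA (line0 : String) : String :=
  let line := PySem.Str.strip line0
  if PySem.Str.isIn ":" line && !(PySem.Str.startswith line "===") then
    match PySem.Str.splitMax? line ":" 1 with
    | some parts =>
        if parts.length = 2 then
          let key := PySem.Str.strip (PySem.List.pyGetD parts 0 "")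
          let value := PySem.Str.strip (PySem.List.pyGetD parts 1 "")
          if key ≠ "" then
            "    <tr><td>" ++ pvEscapeHtml key ++ "</td><td>"
              ++ (if value ≠ "" then pvEscapeHtml value else "&nbsp;") ++ "</td></tr>\n"
          else ""
        else ""
    | none => ""                -- unreachable: the separator ":" is nonempty
  else if line ≠ "" && !(PySem.Str.startswith line "===") then
    if !(PySem.Str.startswith line " ") then
      "    <tr class=\"section-header\"><td colspan=\"2\"><strong>"
        ++ pvEscapeHtml line ++ "</strong></td></tr>\n"
    else ""
  else ""

def parse_powershell_formatlist_table (lines : List String) : String :=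
  let html := "<table class=\"data-table\">\n"
  let html := html ++ "  <thead>\n    <tr><th>Property</th><th>Value</th></tr>\n  </thead>\n"
  let html := html ++ "  <tbody>\n"
  let html := lines.foldl (fun h line => h ++ pvLineA line) html
  html ++ "  </tbody>\n</table>"

-- ===== PORT B =====
def pvEscB (text : String) : String :=
  [("&", "&amp;"), ("<", "&lt;"), (">", "&gt;"), ("\"", "&quot;"), ("'", "&#x27;")].foldl
    (fun t p => PySem.Str.replace t p.1 p.2) text

-- pass 1: one line -> at most one record ((key, some value) = row, (text, none) = header)
def pvClassify (raw : String) : Option (String × Option String) :=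
  let line := PySem.Str.strip raw
  if PySem.Str.startswith line "===" then none
  else
    match PySem.Str.splitMax? line ":" 1 with
    | some [p0, p1] =>
        let key := PySem.Str.strip p0
        if key ≠ "" then some (key, some (PySem.Str.strip p1)) else none
    | _ => if line ≠ "" then some (line, none) else none

-- pass 2: render one record
def pvRender (rec : String × Option String) : String :=
  match rec.2 with
  | some v =>
      "    <tr><td>" ++ pvEscB rec.1 ++ "</td><td>"
        ++ (if v ≠ "" then pvEscB v else "&nbsp;") ++ "</td></tr>\n"
  | none =>
      "    <tr class=\"section-header\"><td colspan=\"2\"><strong>"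
        ++ pvEscB rec.1 ++ "</strong></td></tr>\n"

def parse_powershell_formatlist_table_alt (lines : List String) : String :=
  "<table class=\"data-table\">\n  <thead>\n    <tr><th>Property</th><th>Value</th></tr>\n  </thead>\n  <tbody>\n"
    ++ PySem.Str.join "" ((lines.filterMap pvClassify).map pvRender)
    ++ "  </tbody>\n</table>"

-- ===== PRECONDITION & SPEC =====
def Spec_parse_powershell_formatlist_table (lines : List String) (out : String) : Prop := out = parse_powershell_formatlist_table_alt lines
instance (lines : List String) (out : String) : Decidable (Spec_parse_powershell_formatlist_table lines out) := by unfold Spec_parse_powershell_formatlist_table; infer_instance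

-- ===== CLAIM (what is proved, stated in full; the proofs are below) =====
def Claim_equal_parse_powershell_formatlist_table : Prop := ∀ (lines : List String), Dom_parse_powershell_formatlist_table lines → Spec_parse_powershell_formatlist_table lines (parse_powershell_formatlist_table lines)

-- ===== LEMMAS AND PROOFS =====

-- split(':', 1): characterisation of the fuelled splitter for a single-character separator
theorem pvGo_spec (l : List Char) : ∀ (fuel : Nat) (cur : List Char) (acc : List (List Char)),
    l.length < fuel →
    PySem.Chars.splitOnMax.go [':'] fuel 1 l cur acc =
      (if ':' ∈ l then
        ((l.dropWhile (· ≠ ':')).tail :: (cur.reverse ++ l.takeWhile (· ≠ ':')) :: acc).reverse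
      else ((cur.reverse ++ l) :: acc).reverse) := by
  induction l with
  | nil =>
    intro fuel cur acc h
    match fuel, h with
    | fuel+1, _ => rw [PySem.Chars.splitOnMax.go.eq_def]; simp
  | cons c rest ih =>
    intro fuel cur acc h
    match fuel, h with
    | fuel+1, h =>
      rw [PySem.Chars.splitOnMax.go.eq_def]
      by_cases hc : c = ':'
      · subst hc
        have hstep : PySem.Chars.splitOnMax.go [':'] fuel 0 rest [] (cur.reverse :: acc)
            = (rest :: cur.reverse :: acc).reverse := by
          match fuel with
          | 0 => rw [PySem.Chars.splitOnMax.go.eq_def]; simp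
          | f+1 =>
            rw [PySem.Chars.splitOnMax.go.eq_def]
            cases rest <;> simp
        simp [List.isPrefixOf, hstep, List.dropWhile, List.takeWhile]
      · have hpre : [':'].isPrefixOf (c :: rest) = false := by
          simp [List.isPrefixOf]
          exact fun hh => absurd hh.symm hc
        dsimp only
        rw [if_neg (by omega : ¬(1:Nat) = 0), hpre]
        simp only [Bool.false_eq_true, if_false]
        rw [ih fuel (c :: cur) acc (by simpa using Nat.lt_of_succ_lt_succ h)]
        by_cases hr : ':' ∈ rest <;>
          simp [List.mem_cons, hr, List.dropWhile, List.takeWhile, hc, Ne.symm hc]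

theorem pvSplit_spec (line : String) :
    ∃ parts, PySem.Str.splitMax? line ":" 1 = some parts ∧
      (if PySem.Str.isIn ":" line = true then parts.length = 2 else parts = [line]) := by
  have hin : PySem.Str.isIn ":" line = true ↔ ':' ∈ line.toList := by
    rw [PySem.Str.isIn_iff_infix]
    simpa using List.singleton_infix_iff ':' line.toList
  have hgo := pvGo_spec line.toList (line.toList.length + 1) [] [] (by omega)
  rw [PySem.Str.splitMax?]
  rw [PySem.Chars.splitMax?]
  rw [if_neg (by simp : ¬(":".toList.isEmpty = true))]
  rw [PySem.Chars.splitOnMax]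
  rw [if_neg (by omega : ¬(1:Int) < 0)]
  have hsep : (":".toList) = [':'] := by decide
  rw [hsep]
  rw [show Int.toNat 1 = 1 from rfl, hgo]
  by_cases hm : ':' ∈ line.toList
  · refine ⟨_, rfl, ?_⟩
    rw [if_pos (hin.mpr hm)]
    simp [hm]
  · refine ⟨_, rfl, ?_⟩
    rw [if_neg (by rw [hin]; exact hm)]
    simp [hm, String.ofList_toList]

-- a stripped nonempty line never starts with a space
theorem pvStripChars (cs : List Char) (h : PySem.Chars.strip cs ≠ []) :
    PySem.Chars.startswith (PySem.Chars.strip cs) [' '] = false := by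
  rw [PySem.Chars.strip] at *
  set u := PySem.Chars.lstrip cs with hu
  rw [PySem.Chars.rstrip] at *
  have hpref : (List.dropWhile PySem.Chars.isspace u.reverse).reverse <+: u := by
    have := List.dropWhile_suffix (l := u.reverse) PySem.Chars.isspace
    have h2 := (List.reverse_prefix (l₁ := (List.dropWhile PySem.Chars.isspace u.reverse)) (l₂ := u.reverse)).mpr this
    simpa using h2
  rcases hr : (List.dropWhile PySem.Chars.isspace u.reverse).reverse with _ | ⟨c, t⟩
  · exact absurd hr h
  · rw [hr] at hpref
    obtain ⟨r, hrr⟩ := hpref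
    have hu2 : List.dropWhile PySem.Chars.isspace cs = c :: (t ++ r) := by
      rw [hu, PySem.Chars.lstrip] at hrr; simpa using hrr.symm
    have w : List.dropWhile PySem.Chars.isspace cs ≠ [] := by rw [hu2]; simp
    have hhead := List.head_dropWhile_not PySem.Chars.isspace w
    simp only [hu2, List.head_cons] at hhead
    have hc : c ≠ ' ' := by
      intro he; rw [he] at hhead; exact absurd hhead (by decide)
    rw [PySem.Chars.startswith]
    simp [List.isPrefixOf, Ne.symm hc]

theorem pvStrip_no_lead_space (s : String) (h : PySem.Str.strip s ≠ "") :
    PySem.Str.startswith (PySem.Str.strip s) " " = false := by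
  rw [PySem.Str.startswith_eq]
  have h' : PySem.Chars.strip s.toList ≠ [] := by
    intro he
    apply h
    apply String.toList_inj.mp
    rw [PySem.Str.toList_strip, he]
    rfl
  rw [PySem.Str.toList_strip]
  simpa using pvStripChars s.toList h'

-- the two escape helpers agree
theorem pvEsc_eq (t : String) : pvEscapeHtml t = pvEscB t := by
  by_cases h : t = ""
  · subst h; decide
  · rw [pvEscapeHtml, if_neg h, pvEscB]
    simp [List.foldl]

-- B's classify-then-render of a line equals A's per-line chunk
theorem pvLine_eq (raw : String) :
    pvLineA raw = (match pvClassify raw with | none => "" | some r => pvRender r) := by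
  simp only [pvLineA, pvClassify]
  obtain ⟨parts, hp, hshape⟩ := pvSplit_spec (PySem.Str.strip raw)
  rw [hp]
  by_cases h3 : PySem.Str.startswith (PySem.Str.strip raw) "===" = true
  · simp only [h3, Bool.not_true, Bool.and_false, Bool.false_eq_true, if_false, if_true]
  · have h3' : PySem.Str.startswith (PySem.Str.strip raw) "===" = false := by
      cases hb : PySem.Str.startswith (PySem.Str.strip raw) "===" with
      | false => rfl
      | true => exact absurd hb h3
    simp only [h3', Bool.not_false, Bool.and_true, Bool.false_eq_true, if_false]
    by_cases hin : PySem.Str.isIn ":" (PySem.Str.strip raw) = true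
    · rw [if_pos hin] at hshape
      match parts, hshape with
      | [p0, p1], _ =>
        have hg0 : PySem.List.pyGetD ([p0, p1] : List String) (0:Int) "" = p0 := rfl
        have hg1 : PySem.List.pyGetD ([p0, p1] : List String) (1:Int) "" = p1 := rfl
        simp only [hin, if_true, List.length_cons, List.length_nil, hg0, hg1]
        by_cases hk : PySem.Str.strip p0 = ""
        · simp [hk]
        · simp [hk, pvRender, pvEsc_eq]
    · rw [if_neg hin] at hshape
      subst hshape
      have hin' : PySem.Str.isIn ":" (PySem.Str.strip raw) = false := by
        cases hb : PySem.Str.isIn ":" (PySem.Str.strip raw) with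
        | false => rfl
        | true => exact absurd hb hin
      simp only [hin', Bool.false_eq_true, if_false]
      by_cases hne : PySem.Str.strip raw = ""
      · simp [hne]
      · have hsp := pvStrip_no_lead_space raw hne
        rw [PySem.Str.startswith_eq, PySem.Str.toList_strip] at hsp
        simp only [show (" ":String).toList = [' '] from rfl] at hsp
        simp [hne, hsp, pvRender, pvEsc_eq]

theorem pvJoin_cons (x : String) (xs : List String) :
    PySem.Str.join "" (x :: xs) = x ++ PySem.Str.join "" xs := by
  apply String.toList_inj.mp
  rw [String.toList_append, PySem.Str.toList_join, PySem.Str.toList_join]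
  cases xs with
  | nil =>
    simp only [List.map_cons, List.map_nil]
    rw [PySem.Chars.join_nil, PySem.Chars.join_singleton]
    simp
  | cons y ys =>
    rw [List.map_cons, List.map_cons, PySem.Chars.join_cons_cons]
    simp

theorem pvJoin_nil : PySem.Str.join "" ([] : List String) = "" := by
  apply String.toList_inj.mp
  rw [PySem.Str.toList_join]
  simp [PySem.Chars.join_nil]

theorem pvFold_eq (lines : List String) : ∀ (acc : String),
    lines.foldl (fun h line => h ++ pvLineA line) acc
      = acc ++ PySem.Str.join "" ((lines.filterMap pvClassify).map pvRender) := by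
  induction lines with
  | nil =>
    intro acc
    rw [List.foldl_nil, List.filterMap_nil, List.map_nil, pvJoin_nil, String.append_empty]
  | cons l ls ih =>
    intro acc
    rw [List.foldl_cons, ih, pvLine_eq l]
    cases hc : pvClassify l with
    | none =>
      rw [List.filterMap_cons_none hc]
      simp only [String.append_empty]
    | some r =>
      rw [List.filterMap_cons_some hc]
      rw [List.map_cons, pvJoin_cons, String.append_assoc]

-- ===== VERDICT (by name: the statement is the Claim_ definition above) =====
theorem parse_powershell_formatlist_table_spec : Claim_equal_parse_powershell_formatlist_table := by
  intro lines _
  unfold Spec_parse_powershell_formatlist_table parse_powershell_formatlist_table parse_powershell_formatlist_table_alt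
  simp only [pvFold_eq, String.append_assoc]
  rfl
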